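-- pv_equiv track=rewrite | github.com/BlackDovah/My_Bioinformatics_Journey | Course/Antibiotics.py | sub_peptide_generator_LINEAR
-- ===== SOURCE A (Python) =====
-- def sub_peptide_generator_LINEAR(Peptide):
--     subPeptides = []
--
--     n = len(Peptide)
--     for ind in range(len(Peptide)):
--         if ind > 1:
--             n -= 1
--         for inc in range(1, n):
--             subPeptides.append(Peptide[ind:ind+inc])
--     subPeptides.sort(key=len)
--     return subPeptides
-- ===== SOURCE B (Python) =====
-- def sub_peptide_generator_LINEAR(Peptide):
--     n = len(Peptide)
--     return [Peptide[i:i + L] for L in range(1, n) for i in range(n - L + 1)]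
-- ===== Notes on version B (the rewrite author's own statement) =====
-- stated objective: simpler
-- what changed: Replaces A's start-index-major build with a mutating length counter followed by a stable sort by length with a direct length-major double comprehension that emits the substrings already in the required order, with no sort at all.
import Mathlib
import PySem

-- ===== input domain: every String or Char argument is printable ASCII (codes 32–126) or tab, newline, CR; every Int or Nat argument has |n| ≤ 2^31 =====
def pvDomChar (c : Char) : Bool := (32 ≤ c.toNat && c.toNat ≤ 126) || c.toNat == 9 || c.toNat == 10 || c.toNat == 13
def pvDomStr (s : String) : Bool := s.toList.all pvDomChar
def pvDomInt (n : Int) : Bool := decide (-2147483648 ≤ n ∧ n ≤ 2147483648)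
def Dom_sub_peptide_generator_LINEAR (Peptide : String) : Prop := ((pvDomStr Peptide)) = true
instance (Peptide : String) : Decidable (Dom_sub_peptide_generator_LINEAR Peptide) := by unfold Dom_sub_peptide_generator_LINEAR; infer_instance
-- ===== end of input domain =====

-- B replaces A's index-major build followed by a stable sort by length with a direct
-- length-major double comprehension that needs no sort; the return values are proved equal.

-- ===== PORT A =====
def sub_peptide_generator_LINEAR (Peptide : String) : List String :=
  -- subPeptides = []; n = len(Peptide)
  -- for ind in range(len(Peptide)):
  --     if ind > 1: n -= 1
  --     for inc in range(1, n): subPeptides.append(Peptide[ind:ind+inc])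
  let st := (PySem.List.pyRange 0 (PySem.Str.len Peptide)).foldl
    (fun (st : Int × List String) ind =>
      let n := if ind > 1 then st.1 - 1 else st.1
      (n, (PySem.List.pyRange 1 n).foldl
            (fun acc inc => acc ++ [PySem.Str.slice Peptide (some ind) (some (ind + inc))])
            st.2))
    (PySem.Str.len Peptide, [])
  -- subPeptides.sort(key=len)  (stable sort by length)
  PySem.List.sorted st.2 (fun s => PySem.Str.len s) false

-- ===== PORT B =====
def sub_peptide_generator_LINEAR_alt (Peptide : String) : List String :=
  -- n = len(Peptide); [Peptide[i:i+L] for L in range(1, n) for i in range(n - L + 1)]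
  let n := PySem.Str.len Peptide
  (PySem.List.pyRange 1 n).flatMap (fun L =>
    (PySem.List.pyRange 0 (n - L + 1)).map (fun i =>
      PySem.Str.slice Peptide (some i) (some (i + L))))

-- ===== PRECONDITION & SPEC =====
def Spec_sub_peptide_generator_LINEAR (Peptide : String) (out : List String) : Prop := out = sub_peptide_generator_LINEAR_alt Peptide
instance (Peptide : String) (out : List String) : Decidable (Spec_sub_peptide_generator_LINEAR Peptide out) := by unfold Spec_sub_peptide_generator_LINEAR; infer_instance

-- ===== CLAIM (what is proved, stated in full; the proofs are below) =====
def Claim_equal_sub_peptide_generator_LINEAR : Prop := ∀ (Peptide : String), Dom_sub_peptide_generator_LINEAR Peptide → Spec_sub_peptide_generator_LINEAR Peptide (sub_peptide_generator_LINEAR Peptide)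

-- ===== LEMMAS AND PROOFS =====

-- the substring Peptide[i:i+L] for natural i, L
def pvSlice (P : String) (i L : Nat) : String :=
  PySem.Str.slice P (some (i : Int)) (some ((i : Int) + (L : Int)))

-- canonical length-major list: lengths L = j+1 for j < n-1, starts i < n-j
def pvCanon (P : String) : List String :=
  (List.range (P.toList.length - 1)).flatMap (fun j =>
    (List.range (P.toList.length - j)).map (fun i => pvSlice P i (j + 1)))

-- the (exclusive) bound of A's inner range when the outer index is ind
def pvBnd (N ind : Nat) : Int := if 2 ≤ ind then (N : Int) - ind + 1 else N

-- the substrings A appends during outer iteration ind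
def pvGroup (P : String) (ind : Nat) : List String :=
  (PySem.List.pyRange 1 (pvBnd P.toList.length ind)).map (fun inc =>
    PySem.Str.slice P (some (ind : Int)) (some ((ind : Int) + inc)))

lemma pv_b_eq_canon (P : String) : sub_peptide_generator_LINEAR_alt P = pvCanon P := by
  show (PySem.List.pyRange 1 (PySem.Str.len P)).flatMap (fun L =>
      (PySem.List.pyRange 0 (PySem.Str.len P - L + 1)).map (fun i =>
        PySem.Str.slice P (some i) (some (i + L)))) = pvCanon P
  rw [PySem.Str.len_eq, PySem.List.pyRange_one 1, List.flatMap_map, pvCanon]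
  have hN : ((P.toList.length : Int) - 1).toNat = P.toList.length - 1 := by omega
  rw [hN]
  apply List.flatMap_congr
  intro j hj
  rw [List.mem_range] at hj
  rw [PySem.List.pyRange_one 0]
  have h2 : ((P.toList.length : Int) - (1 + (j : Int)) + 1 - 0).toNat = P.toList.length - j := by omega
  rw [h2, List.map_map]
  apply List.map_congr_left
  intro i _
  show PySem.Str.slice P (some (0 + (i : Int))) (some (0 + (i : Int) + (1 + (j : Int)))) = pvSlice P i (j + 1)
  unfold pvSlice
  have h4 : (1 : Int) + (j : Int) = ((j + 1 : Nat) : Int) := by push_cast; ring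
  rw [h4]
  simp only [zero_add]

-- closed form of A's outer loop: state after m iterations
lemma pv_loopA (P : String) (m : Nat) :
    (PySem.List.pyRange 0 (m : Int)).foldl
      (fun (st : Int × List String) ind =>
        let n := if ind > 1 then st.1 - 1 else st.1
        (n, (PySem.List.pyRange 1 n).foldl
              (fun acc inc => acc ++ [PySem.Str.slice P (some ind) (some (ind + inc))])
              st.2))
      ((P.toList.length : Int), [])
    = ((P.toList.length : Int) - max ((m : Int) - 2) 0, (List.range m).flatMap (pvGroup P)) := by
  induction m with
  | zero => simp [PySem.List.pyRange_one_eq_nil]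
  | succ m ih =>
    rw [show ((m + 1 : Nat) : Int) = (m : Int) + 1 by push_cast; ring,
        PySem.List.pyRange_one_succ_right (by omega : (0:Int) ≤ (m:Int)),
        List.foldl_append, ih]
    simp only [List.foldl_cons, List.foldl_nil]
    rw [PySem.List.foldl_append_singleton_eq_map]
    have hbnd : (if (m : Int) > 1 then (P.toList.length : Int) - max ((m : Int) - 2) 0 - 1
        else (P.toList.length : Int) - max ((m : Int) - 2) 0) = pvBnd P.toList.length m := by
      unfold pvBnd; split_ifs <;> omega
    rw [List.range_succ, List.flatMap_append]
    refine Prod.ext ?_ ?_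
    · show (if (m : Int) > 1 then _ else _) = _
      split_ifs <;> simp <;> omega
    · show _ ++ _ = _ ++ _
      rw [hbnd]
      simp [pvGroup]

lemma pv_insertBy_append_left {α : Type} (before : α → α → Bool) (x : α) (ys zs : List α)
    (h : ∀ y ∈ ys, before x y = false) :
    PySem.List.insertBy before x (ys ++ zs) = ys ++ PySem.List.insertBy before x zs := by
  induction ys with
  | nil => simp
  | cons y ys ih =>
    have hy : before x y = false := h y (by simp)
    simp [PySem.List.insertBy, hy, ih (fun y hy' => h y (by simp [hy']))]

lemma pv_insertBy_cons_all {α : Type} (before : α → α → Bool) (x : α) (zs : List α)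
    (h : ∀ y ∈ zs, before x y = true) :
    PySem.List.insertBy before x zs = x :: zs := by
  cases zs with
  | nil => simp [PySem.List.insertBy]
  | cons y ys => simp [PySem.List.insertBy, h y (by simp)]

-- stability: Python's stable sort by an Int key with values in [0, N)
-- is the concatenation of the key classes in increasing key order
lemma pv_sorted_blocks {α : Type} (key : α → Int) (xs : List α) (N : Nat)
    (h : ∀ x ∈ xs, 0 ≤ key x ∧ key x < N) :
    PySem.List.sorted xs key false
      = (List.range N).flatMap (fun k : Nat => xs.filter (fun x => key x == (k : Int))) := by
  rw [PySem.List.sorted_eq_foldl_insertBy]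
  induction xs using List.reverseRecOn with
  | nil => simp
  | append_singleton xs x ih =>
    rw [List.foldl_append, List.foldl_cons, List.foldl_nil,
        ih (fun y hy => h y (List.mem_append_left _ hy))]
    obtain ⟨hx0, hxN⟩ := h x (by simp)
    set m : Nat := (key x).toNat with hm
    have hkey : key x = (m : Int) := by omega
    have hmN : m < N := by omega
    have hsplit : List.range N = List.range (m+1) ++ (List.range (N-(m+1))).map (fun j => (m+1) + j) := by
      rw [← List.range_add]; congr 1; omega
    set f : Nat → List α := fun k : Nat => xs.filter (fun x' => key x' == (k : Int)) with hf
    set f' : Nat → List α := fun k => (xs ++ [x]).filter (fun x' => key x' == (k : Int)) with hf'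
    have hfk : ∀ k, k ≠ m → f' k = f k := by
      intro k hk
      simp only [hf', hf, List.filter_append, List.filter_cons, List.filter_nil]
      have : (key x == (k : Int)) = false := by
        simp [hkey]; omega
      simp [this]
    have hfm : f' m = f m ++ [x] := by
      simp only [hf', hf, List.filter_append, List.filter_cons, List.filter_nil]
      simp [hkey]
    rw [hsplit, List.flatMap_append, List.flatMap_append]
    rw [pv_insertBy_append_left]
    · rw [pv_insertBy_cons_all]
      · -- assemble
        have h1 : (List.range m).flatMap f' = (List.range m).flatMap f :=
          List.flatMap_congr (fun k hk => hfk k (by rw [List.mem_range] at hk; omega))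
        have h2 : ((List.range (N-(m+1))).map (fun j => (m+1) + j)).flatMap f'
            = ((List.range (N-(m+1))).map (fun j => (m+1) + j)).flatMap f := by
          apply List.flatMap_congr
          intro k hk
          apply hfk
          simp only [List.mem_map, List.mem_range] at hk
          omega
        rw [List.range_succ, List.flatMap_append, List.flatMap_append, h1, h2]
        simp [hfm]
      · intro y hy
        simp only [List.mem_flatMap, List.mem_map, List.mem_range, hf] at hy
        obtain ⟨k, ⟨j, hj, rfl⟩, hyk⟩ := hy
        rw [List.mem_filter] at hyk
        have : key y = ((m+1+j : Nat) : Int) := by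
          have := hyk.2; simpa using this
        simp only [decide_eq_true_eq]
        rw [hkey, this]; push_cast; omega
    · intro y hy
      simp only [List.mem_flatMap, List.mem_range, hf] at hy
      obtain ⟨k, hk, hyk⟩ := hy
      rw [List.mem_filter] at hyk
      have : key y = (k : Int) := by have := hyk.2; simpa using this
      simp only [decide_eq_false_iff_not, not_lt]
      rw [hkey, this]; omega

-- every substring A appends has length exactly inc
lemma pv_len_slice (P : String) (ind : Nat) (inc : Int) (hind : ind < P.toList.length)
    (h1 : 1 ≤ inc) (h2 : inc < pvBnd P.toList.length ind) :
    PySem.Str.len (PySem.Str.slice P (some (ind : Int)) (some ((ind : Int) + inc))) = inc := by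
  have hle : inc ≤ (P.toList.length : Int) - ind := by
    unfold pvBnd at h2; split_ifs at h2 <;> omega
  have hinc : inc = ((inc.toNat : Nat) : Int) := by omega
  rw [PySem.Str.len_eq]
  have hl : (PySem.Str.slice P (some (ind : Int)) (some ((ind : Int) + inc))).toList
      = PySem.List.slice P.toList (some (ind : Int)) (some ((ind : Int) + inc)) := by
    simp [PySem.Str.slice]
  rw [hl, hinc, PySem.List.slice_natCast_add, List.length_take, List.length_drop]
  omega

lemma pv_flatMap_singleton_map {α β : Type} (f : α → β) (l : List α) :
    l.flatMap (fun x => [f x]) = l.map f := by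
  induction l with
  | nil => rfl
  | cons a l ih => simp [ih]

lemma pv_flatMap_if_lt {α : Type} (f : Nat → List α) (M N : Nat) (h : M ≤ N) :
    (List.range N).flatMap (fun i => if i < M then f i else []) = (List.range M).flatMap f := by
  rw [show N = M + (N - M) by omega, List.range_add, List.flatMap_append]
  have h2 : ((List.range (N - M)).map (fun x => M + x)).flatMap (fun i => if i < M then f i else []) = [] := by
    apply List.flatMap_eq_nil_iff.mpr
    intro i hi
    simp only [List.mem_map, List.mem_range] at hi
    obtain ⟨j, _, rfl⟩ := hi
    simp
  rw [h2, List.append_nil]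
  apply List.flatMap_congr
  intro i hi
  rw [List.mem_range] at hi
  simp [hi]

-- the k-th length class of A's pre-sort list
lemma pv_block (P : String) (k : Nat) (hk : k < P.toList.length) :
    ((List.range P.toList.length).flatMap (pvGroup P)).filter
        (fun x => PySem.Str.len x == (k : Int))
      = if k = 0 then [] else (List.range (P.toList.length - k + 1)).map (fun i => pvSlice P i k) := by
  set N := P.toList.length with hN
  rw [List.filter_flatMap]
  have hgrp : ∀ ind ∈ List.range N,
      (pvGroup P ind).filter (fun x => PySem.Str.len x == (k : Int))
        = if 1 ≤ (k : Int) ∧ (k : Int) < pvBnd N ind then [pvSlice P ind k] else [] := by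
    intro ind hind
    rw [List.mem_range] at hind
    unfold pvGroup
    rw [List.filter_map]
    have hfc : (PySem.List.pyRange 1 (pvBnd N ind)).filter
          ((fun x => PySem.Str.len x == (k : Int)) ∘ (fun inc =>
            PySem.Str.slice P (some (ind : Int)) (some ((ind : Int) + inc))))
        = (PySem.List.pyRange 1 (pvBnd N ind)).filter (fun inc => inc == (k : Int)) := by
      apply List.filter_congr
      intro inc hinc
      rw [PySem.List.mem_pyRange_one] at hinc
      simp only [Function.comp_apply]
      rw [pv_len_slice P ind inc hind hinc.1 hinc.2]
    rw [hfc]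
    by_cases hmem : (k : Int) ∈ PySem.List.pyRange 1 (pvBnd N ind)
    · rw [List.filter_beq, List.count_eq_one_of_mem (PySem.List.nodup_pyRange_one 1 _) hmem]
      have := (PySem.List.mem_pyRange_one).mp hmem
      simp [this.1, this.2, pvSlice]
    · rw [List.filter_beq, List.count_eq_zero_of_not_mem hmem]
      have hcond : ¬ (1 ≤ (k : Int) ∧ (k : Int) < pvBnd N ind) :=
        fun h => hmem ((PySem.List.mem_pyRange_one).mpr h)
      rw [if_neg hcond]
      rfl
  rw [List.flatMap_congr hgrp]
  by_cases hk0 : k = 0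
  · subst hk0
    simp
  · have hcond : ∀ ind : Nat, (1 ≤ (k : Int) ∧ (k : Int) < pvBnd N ind) ↔ ind < N - k + 1 := by
      intro ind
      unfold pvBnd
      split_ifs <;> constructor <;> intro <;> omega
    have : (List.range N).flatMap (fun ind => if 1 ≤ (k : Int) ∧ (k : Int) < pvBnd N ind
          then [pvSlice P ind k] else [])
        = (List.range N).flatMap (fun ind => if ind < N - k + 1 then [pvSlice P ind k] else []) := by
      apply List.flatMap_congr
      intro ind _
      by_cases hc : ind < N - k + 1
      · rw [if_pos ((hcond ind).mpr hc), if_pos hc]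
      · rw [if_neg (fun h => hc ((hcond ind).mp h)), if_neg hc]
    rw [this, pv_flatMap_if_lt (fun ind => [pvSlice P ind k]) (N - k + 1) N (by omega), if_neg hk0]
    exact pv_flatMap_singleton_map (fun i => pvSlice P i k) _

lemma pv_pre_len (P : String) :
    ∀ x ∈ (List.range P.toList.length).flatMap (pvGroup P),
      0 ≤ PySem.Str.len x ∧ PySem.Str.len x < (P.toList.length : Int) := by
  intro x hx
  rw [List.mem_flatMap] at hx
  obtain ⟨ind, hind, hx⟩ := hx
  rw [List.mem_range] at hind
  unfold pvGroup at hx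
  rw [List.mem_map] at hx
  obtain ⟨inc, hinc, rfl⟩ := hx
  rw [PySem.List.mem_pyRange_one] at hinc
  rw [pv_len_slice P ind inc hind hinc.1 hinc.2]
  have := hinc.2
  unfold pvBnd at this
  constructor
  · omega
  · split_ifs at this <;> omega

lemma pv_a_eq_canon (P : String) : sub_peptide_generator_LINEAR P = pvCanon P := by
  show PySem.List.sorted
    ((PySem.List.pyRange 0 (PySem.Str.len P)).foldl
      (fun (st : Int × List String) ind =>
        let n := if ind > 1 then st.1 - 1 else st.1
        (n, (PySem.List.pyRange 1 n).foldl
              (fun acc inc => acc ++ [PySem.Str.slice P (some ind) (some (ind + inc))])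
              st.2))
      (PySem.Str.len P, [])).2 (fun s => PySem.Str.len s) false = pvCanon P
  rw [PySem.Str.len_eq]
  have hpre : ((PySem.List.pyRange 0 ((P.toList.length : Nat) : Int)).foldl
      (fun (st : Int × List String) ind =>
        let n := if ind > 1 then st.1 - 1 else st.1
        (n, (PySem.List.pyRange 1 n).foldl
              (fun acc inc => acc ++ [PySem.Str.slice P (some ind) (some (ind + inc))])
              st.2))
      ((P.toList.length : Int), [])).2
      = (List.range P.toList.length).flatMap (pvGroup P) := by
    rw [pv_loopA]
  rw [hpre, pv_sorted_blocks (fun s => PySem.Str.len s) _ P.toList.length (pv_pre_len P)]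
  have hb : ∀ k ∈ List.range P.toList.length,
      ((List.range P.toList.length).flatMap (pvGroup P)).filter
          (fun x => PySem.Str.len x == (k : Int))
        = if k = 0 then [] else (List.range (P.toList.length - k + 1)).map (fun i => pvSlice P i k) := by
    intro k hk
    exact pv_block P k (List.mem_range.mp hk)
  rw [List.flatMap_congr hb]
  rcases Nat.eq_zero_or_pos P.toList.length with h0 | hpos
  · rw [h0]
    simp [pvCanon, h0]
  · rw [show P.toList.length = (P.toList.length - 1) + 1 by omega, List.range_succ_eq_map,
        List.flatMap_cons, List.flatMap_map]
    rw [if_pos rfl, List.nil_append]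
    unfold pvCanon
    apply List.flatMap_congr
    intro j hj
    rw [List.mem_range] at hj
    have hns : ¬ (Nat.succ j = 0) := by omega
    rw [if_neg hns]
    have : (P.toList.length - 1) + 1 - Nat.succ j + 1 = P.toList.length - j := by omega
    rw [this]

-- ===== VERDICT (by name: the statement is the Claim_ definition above) =====
theorem sub_peptide_generator_LINEAR_spec : Claim_equal_sub_peptide_generator_LINEAR := by
  intro P _
  show _ = _
  rw [pv_a_eq_canon, pv_b_eq_canon]
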